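-- pv_equiv track=rewrite | github.com/eliottcassidy2000/math | 04-computation/h21_k10_k8e_check.py | tournament_from_index
-- ===== SOURCE A (Python) =====
-- def tournament_from_index(n, idx):
--     """Create bitmask adjacency from tournament index."""
--     adj = [0] * n
--     bit = 0
--     for i in range(n):
--         for j in range(i+1, n):
--             if idx & (1 << bit):
--                 adj[i] |= (1 << j)
--             else:
--                 adj[j] |= (1 << i)
--             bit += 1
--     return adj
-- ===== SOURCE B (Python) =====
-- def tournament_from_index(n, idx):
--     """Create bitmask adjacency from tournament index."""
--     def off(i):
--         # index of the first bit of row i's block: sum_{k<i} (n-1-k)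
--         return i * (n - 1) - i * (i - 1) // 2
--
--     def row(i):
--         r = 0
--         for k in range(i):  # games lost against earlier rows
--             if not idx & (1 << (off(k) + i - k - 1)):
--                 r |= 1 << k
--         for j in range(i + 1, n):  # games won in row i's own block
--             if idx & (1 << (off(i) + j - i - 1)):
--                 r |= 1 << j
--         return r
--
--     return [row(i) for i in range(n)]
-- ===== Notes on version B (the rewrite author's own statement) =====
-- stated objective: alternative
-- what changed: A scatters pair-by-pair into a mutated adjacency array driven by a single running bit counter; B is a pure per-row comprehension that gathers each row's mask directly, locating every game's bit by the closed-form row offset off(i) = i*(n-1) - i*(i-1)//2 instead of counting.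
import Mathlib
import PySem

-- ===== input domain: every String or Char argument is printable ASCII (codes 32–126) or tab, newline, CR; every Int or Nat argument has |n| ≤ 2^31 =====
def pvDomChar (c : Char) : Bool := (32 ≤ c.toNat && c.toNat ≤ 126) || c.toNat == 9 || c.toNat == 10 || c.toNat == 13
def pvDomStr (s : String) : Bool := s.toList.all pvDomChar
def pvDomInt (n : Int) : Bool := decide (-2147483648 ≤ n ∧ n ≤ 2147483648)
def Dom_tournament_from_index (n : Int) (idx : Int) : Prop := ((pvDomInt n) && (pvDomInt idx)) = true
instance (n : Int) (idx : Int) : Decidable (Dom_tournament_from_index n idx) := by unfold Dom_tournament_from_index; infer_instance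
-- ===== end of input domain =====

-- B gathers each row from closed-form bit offsets instead of A's pair-by-pair scatter with a running counter; same cost, no mutation.

-- ===== PORT A =====
def tournament_from_index (n : Int) (idx : Int) : List Int :=
  let N := n.toNat
  let res := (List.range N).foldl (fun (st : List Int × Nat) i =>
      (List.range' (i+1) (N - (i+1))).foldl (fun (st : List Int × Nat) (j : Nat) =>
        if PySem.Int.band idx ((1:Int) <<< st.2) ≠ 0 then
          (st.1.set i (PySem.Int.bor (st.1.getD i 0) ((1:Int) <<< j)), st.2 + 1)
        else
          (st.1.set j (PySem.Int.bor (st.1.getD j 0) ((1:Int) <<< i)), st.2 + 1)) st)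
    (List.replicate N (0:Int), 0)
  res.1

-- ===== PORT B =====
-- bit offset of row i's block: i*(n-1) - i*(i-1)//2 (no underflow for the i < N that occur)
def pvOff (N i : Nat) : Nat := i * (N - 1) - i * (i - 1) / 2

def tournament_from_index_alt (n : Int) (idx : Int) : List Int :=
  let N := n.toNat
  (List.range N).map (fun i =>
    let losers := (List.range i).foldl (fun r k =>
      if PySem.Int.band idx ((1:Int) <<< (pvOff N k + (i - k - 1))) = 0
      then PySem.Int.bor r ((1:Int) <<< k) else r) 0
    (List.range' (i+1) (N - (i+1))).foldl (fun r j =>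
      if PySem.Int.band idx ((1:Int) <<< (pvOff N i + (j - i - 1))) ≠ 0
      then PySem.Int.bor r ((1:Int) <<< j) else r) losers)

-- ===== PRECONDITION & SPEC =====
def Spec_tournament_from_index (n : Int) (idx : Int) (out : List Int) : Prop := out = tournament_from_index_alt n idx
instance (n : Int) (idx : Int) (out : List Int) : Decidable (Spec_tournament_from_index n idx out) := by unfold Spec_tournament_from_index; infer_instance

-- ===== CLAIM (what is proved, stated in full; the proofs are below) =====
def Claim_equal_tournament_from_index : Prop := ∀ (n : Int) (idx : Int), Dom_tournament_from_index n idx → Spec_tournament_from_index n idx (tournament_from_index n idx)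

-- ===== LEMMAS AND PROOFS =====

-- A's inner-loop step, named for the proofs (definitionally the lambda inside the port)
def pvStepA (idx : Int) (i : Nat) : (List Int × Nat) → Nat → (List Int × Nat) :=
  fun st j =>
    if PySem.Int.band idx ((1:Int) <<< st.2) ≠ 0 then
      (st.1.set i (PySem.Int.bor (st.1.getD i 0) ((1:Int) <<< j)), st.2 + 1)
    else
      (st.1.set j (PySem.Int.bor (st.1.getD j 0) ((1:Int) <<< i)), st.2 + 1)

-- winner-bit gathering fold (bit for position j is b + (j - s))
def pvRowW (idx : Int) (b s : Nat) (l : List Nat) (r : Int) : Int :=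
  l.foldl (fun r j => if PySem.Int.band idx ((1:Int) <<< (b + (j - s))) ≠ 0
    then PySem.Int.bor r ((1:Int) <<< j) else r) r

-- loser-bit update from row k to row t
def pvLUpd (idx : Int) (N k t : Nat) (r : Int) : Int :=
  if PySem.Int.band idx ((1:Int) <<< (pvOff N k + (t - k - 1))) = 0
  then PySem.Int.bor r ((1:Int) <<< k) else r

theorem pv_getD_set_self (xs : List Int) (u : Nat) (v : Int) (h : u < xs.length) :
    (xs.set u v).getD u 0 = v := by
  simp [List.getD_eq_getElem?_getD, h]

theorem pv_getD_set_ne (xs : List Int) (u t : Nat) (v : Int) (h : u ≠ t) :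
    (xs.set u v).getD t 0 = xs.getD t 0 := by
  simp [List.getD_eq_getElem?_getD, h]

theorem pvRowW_shift (idx : Int) (b s m : Nat) (r : Int) :
    pvRowW idx (b+1) (s+1) (List.range' (s+1) m) r = pvRowW idx b s (List.range' (s+1) m) r := by
  unfold pvRowW
  apply PySem.List.foldl_congr_mem
  intro acc x hx
  have hs : s + 1 ≤ x := (List.mem_range'_1.mp hx).1
  have harg : b + 1 + (x - (s+1)) = b + (x - s) := by omega
  rw [harg]

theorem pvRowW_cons (idx : Int) (b s m : Nat) (r : Int) :
    pvRowW idx b s (s :: List.range' (s+1) m) r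
      = pvRowW idx (b+1) (s+1) (List.range' (s+1) m)
          (if PySem.Int.band idx ((1:Int) <<< b) ≠ 0 then PySem.Int.bor r ((1:Int) <<< s) else r) := by
  rw [pvRowW_shift]
  unfold pvRowW
  rw [List.foldl_cons]
  simp

theorem pv_innerA (idx : Int) (i : Nat) :
    ∀ (m s b : Nat) (adj : List Int), i < s → i < adj.length → s + m ≤ adj.length →
      (((List.range' s m).foldl (pvStepA idx i) (adj, b)).2 = b + m) ∧
      (((List.range' s m).foldl (pvStepA idx i) (adj, b)).1.length = adj.length) ∧
      (∀ t, t < adj.length →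
        ((List.range' s m).foldl (pvStepA idx i) (adj, b)).1.getD t 0 =
          if t = i then pvRowW idx b s (List.range' s m) (adj.getD i 0)
          else if s ≤ t ∧ t < s + m ∧ PySem.Int.band idx ((1:Int) <<< (b + (t - s))) = 0
            then PySem.Int.bor (adj.getD t 0) ((1:Int) <<< i)
            else adj.getD t 0) := by
  intro m
  induction m with
  | zero =>
    intro s b adj his hi hsm
    refine ⟨rfl, rfl, ?_⟩
    intro t ht
    by_cases hti : t = i
    · subst hti; simp [pvRowW]
    · rw [if_neg hti, if_neg (by rintro ⟨h1, h2, _⟩; omega)]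
      rfl
  | succ m ih =>
    intro s b adj his hi hsm
    rw [List.range'_succ, List.foldl_cons]
    by_cases hP : PySem.Int.band idx ((1:Int) <<< b) = 0
    · -- loser branch at j = s
      have hstep : pvStepA idx i (adj, b) s
          = (adj.set s (PySem.Int.bor (adj.getD s 0) ((1:Int) <<< i)), b + 1) := by
        simp [pvStepA, hP]
      rw [hstep]
      obtain ⟨ih1, ih2, ih3⟩ := ih (s+1) (b+1)
        (adj.set s (PySem.Int.bor (adj.getD s 0) ((1:Int) <<< i)))
        (by omega) (by simpa using hi) (by simp; omega)
      refine ⟨by rw [ih1]; omega, by rw [ih2]; simp, ?_⟩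
      intro t ht
      rw [ih3 t (by simpa using ht)]
      by_cases hti : t = i
      · subst hti
        rw [if_pos rfl, if_pos rfl, pvRowW_cons]
        rw [pv_getD_set_ne _ _ _ _ (by omega)]
        simp [hP]
      · rw [if_neg hti, if_neg hti]
        by_cases hts : t = s
        · subst hts
          rw [if_neg (by rintro ⟨h1, _, _⟩; omega)]
          rw [pv_getD_set_self _ _ _ (by omega)]
          rw [if_pos ⟨le_refl t, by omega, by simpa using hP⟩]
        · rw [pv_getD_set_ne _ _ _ _ (fun h => hts h.symm)]
          by_cases hc : s + 1 ≤ t ∧ t < s + 1 + m ∧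
              PySem.Int.band idx ((1:Int) <<< (b + 1 + (t - (s+1)))) = 0
          · obtain ⟨h1, h2, h3⟩ := hc
            rw [if_pos ⟨h1, h2, h3⟩,
              if_pos ⟨by omega, by omega, by rw [show b + (t - s) = b + 1 + (t - (s+1)) by omega]; exact h3⟩]
          · rw [if_neg hc, if_neg ?_]
            rintro ⟨h1, h2, h3⟩
            exact hc ⟨by omega, by omega,
              by rw [show b + 1 + (t - (s+1)) = b + (t - s) by omega]; exact h3⟩
    · -- winner branch at j = s
      have hstep : pvStepA idx i (adj, b) s
          = (adj.set i (PySem.Int.bor (adj.getD i 0) ((1:Int) <<< s)), b + 1) := by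
        simp [pvStepA, hP]
      rw [hstep]
      obtain ⟨ih1, ih2, ih3⟩ := ih (s+1) (b+1)
        (adj.set i (PySem.Int.bor (adj.getD i 0) ((1:Int) <<< s)))
        (by omega) (by simpa using hi) (by simp; omega)
      refine ⟨by rw [ih1]; omega, by rw [ih2]; simp, ?_⟩
      intro t ht
      rw [ih3 t (by simpa using ht)]
      by_cases hti : t = i
      · subst hti
        rw [if_pos rfl, if_pos rfl, pvRowW_cons]
        rw [pv_getD_set_self _ _ _ hi]
        simp [hP]
      · rw [if_neg hti, if_neg hti]
        rw [pv_getD_set_ne _ _ _ _ (fun h => hti h.symm)]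
        by_cases hts : t = s
        · subst hts
          rw [if_neg (by rintro ⟨h1, _, _⟩; omega)]
          rw [if_neg (by rintro ⟨_, _, h3⟩; exact hP (by simpa using h3))]
        · by_cases hc : s + 1 ≤ t ∧ t < s + 1 + m ∧
              PySem.Int.band idx ((1:Int) <<< (b + 1 + (t - (s+1)))) = 0
          · obtain ⟨h1, h2, h3⟩ := hc
            rw [if_pos ⟨h1, h2, h3⟩,
              if_pos ⟨by omega, by omega, by rw [show b + (t - s) = b + 1 + (t - (s+1)) by omega]; exact h3⟩]
          · rw [if_neg hc, if_neg ?_]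
            rintro ⟨h1, h2, h3⟩
            exact hc ⟨by omega, by omega,
              by rw [show b + 1 + (t - (s+1)) = b + (t - s) by omega]; exact h3⟩

theorem pv_tri_succ (r : Nat) : (r+1) * r / 2 = r * (r-1) / 2 + r := by
  cases r with
  | zero => simp
  | succ q =>
    show (q+2) * (q+1) / 2 = (q+1) * ((q+1)-1) / 2 + (q+1)
    have h : (q+2) * (q+1) = (q+1) * q + 2 * (q+1) := by ring
    rw [h, Nat.mul_comm 2 (q+1), Nat.add_mul_div_right _ _ (by norm_num)]
    simp

theorem pv_off_step (N r : Nat) (h : r < N) : pvOff N (r+1) = pvOff N r + (N - (r+1)) := by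
  unfold pvOff
  have h1 : (r+1) * ((r+1)-1) / 2 = r * (r-1) / 2 + r := by simpa using pv_tri_succ r
  have h2 : (r+1) * (N-1) = r * (N-1) + (N-1) := by ring
  have h3 : r * (r-1) / 2 + r ≤ r * (N-1) := by
    have e1 : r * (r-1) / 2 ≤ r * (r-1) := Nat.div_le_self _ _
    have e2 : r * (r-1) + r = r * r := by
      cases r with
      | zero => simp
      | succ q => simp; ring
    have e3 : r * r ≤ r * (N-1) := Nat.mul_le_mul_left _ (by omega)
    omega
  rw [h1, h2]
  omega

theorem pv_outerA (idx : Int) (N : Nat) :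
    ∀ (m r b : Nat) (adj : List Int), r + m = N → adj.length = N → b = pvOff N r →
      ((((List.range' r m).foldl
          (fun (st : List Int × Nat) i => (List.range' (i+1) (N - (i+1))).foldl (pvStepA idx i) st)
          (adj, b)).1.length = N) ∧
       (∀ t, t < N →
        (((List.range' r m).foldl
          (fun (st : List Int × Nat) i => (List.range' (i+1) (N - (i+1))).foldl (pvStepA idx i) st)
          (adj, b)).1.getD t 0 =
          if t < r then adj.getD t 0
          else pvRowW idx (pvOff N t) (t+1) (List.range' (t+1) (N-(t+1)))
                 ((List.range' r (t - r)).foldl (fun acc k => pvLUpd idx N k t acc) (adj.getD t 0))))) := by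
  intro m
  induction m with
  | zero =>
    intro r b adj hrm hlen hb
    refine ⟨hlen, ?_⟩
    intro t ht
    rw [if_pos (by omega)]
    rfl
  | succ m ih =>
    intro r b adj hrm hlen hb
    rw [List.range'_succ, List.foldl_cons]
    obtain ⟨in1, in2, in3⟩ := pv_innerA idx r (N - (r+1)) (r+1) b adj
      (by omega) (by omega) (by omega)
    set adj1 := ((List.range' (r+1) (N - (r+1))).foldl (pvStepA idx r) (adj, b)).1 with hadj1
    set b1 := ((List.range' (r+1) (N - (r+1))).foldl (pvStepA idx r) (adj, b)).2 with hb1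
    have hpair : (List.range' (r+1) (N - (r+1))).foldl (pvStepA idx r) (adj, b) = (adj1, b1) := rfl
    rw [hpair]
    have hb1' : b1 = pvOff N (r+1) := by
      rw [in1, hb]
      exact (pv_off_step N r (by omega)).symm
    obtain ⟨o1, o2⟩ := ih (r+1) b1 adj1 (by omega) (by rw [in2, hlen]) hb1'
    refine ⟨o1, ?_⟩
    intro t ht
    rw [o2 t ht]
    by_cases htr : t < r
    · rw [if_pos (by omega), if_pos htr]
      rw [in3 t (by omega), if_neg (by omega), if_neg (by rintro ⟨h1, _, _⟩; omega)]
    · by_cases hter : t = r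
      · subst hter
        rw [if_pos (by omega), if_neg htr]
        rw [in3 t (by omega), if_pos rfl, hb]
        rw [show t - t = 0 from Nat.sub_self t]
        rfl
      · -- t > r
        rw [if_neg (by omega), if_neg htr]
        have hst : adj1.getD t 0 = pvLUpd idx N r t (adj.getD t 0) := by
          rw [in3 t (by omega), if_neg (fun h => hter h)]
          unfold pvLUpd
          rw [show b + (t - (r+1)) = pvOff N r + (t - r - 1) by omega]
          by_cases hc : PySem.Int.band idx ((1:Int) <<< (pvOff N r + (t - r - 1))) = 0
          · rw [if_pos ⟨by omega, by omega, hc⟩, if_pos hc]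
          · rw [if_neg (by rintro ⟨_, _, h3⟩; exact hc h3), if_neg hc]
        rw [hst]
        rw [show t - r = (t - (r+1)) + 1 by omega, List.range'_succ, List.foldl_cons]

-- ===== VERDICT (by name: the statement is the Claim_ definition above) =====
theorem tournament_from_index_spec : Claim_equal_tournament_from_index := by
  intro n idx _
  unfold Spec_tournament_from_index
  set N := n.toNat with hN
  have hA : tournament_from_index n idx =
      ((List.range N).foldl
        (fun (st : List Int × Nat) i => (List.range' (i+1) (N - (i+1))).foldl (pvStepA idx i) st)
        (List.replicate N (0:Int), 0)).1 := rfl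
  obtain ⟨o1, o2⟩ := pv_outerA idx N N 0 0 (List.replicate N (0:Int))
    (by omega) (by simp) (by simp [pvOff])
  rw [List.range_eq_range'] at hA
  apply List.ext_getElem
  · rw [hA, o1]
    simp [tournament_from_index_alt, hN]
  · intro t h1 h2
    have htN : t < N := by rw [hA, o1] at h1; exact h1
    rw [← List.getD_eq_getElem _ 0 h1, ← List.getD_eq_getElem _ 0 h2, hA, o2 t htN]
    rw [if_neg (by omega)]
    show _ = (tournament_from_index_alt n idx).getD t 0
    have hB : tournament_from_index_alt n idx =
        (List.range N).map (fun i =>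
          (List.range' (i+1) (N - (i+1))).foldl (fun r j =>
            if PySem.Int.band idx ((1:Int) <<< (pvOff N i + (j - i - 1))) ≠ 0
            then PySem.Int.bor r ((1:Int) <<< j) else r)
          ((List.range i).foldl (fun r k =>
            if PySem.Int.band idx ((1:Int) <<< (pvOff N k + (i - k - 1))) = 0
            then PySem.Int.bor r ((1:Int) <<< k) else r) 0)) := rfl
    rw [List.getD_replicate _ htN, show t - 0 = t from rfl, hB]
    rw [List.getD_eq_getElem _ 0 (by simpa using htN)]
    simp only [List.getElem_map, List.getElem_range]
    -- both sides are the same folds once the bit positions are written as j - (t+1) = j - t - 1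
    rw [← List.range_eq_range']
    simp only [pvRowW, pvLUpd, Nat.sub_sub]
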